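-- pv_equiv track=rewrite | github.com/sventhijssen/Mask_RCNN | samples/clevr/Query.py | _group_words_by_action
-- ===== SOURCE A (Python) =====
-- def _group_words_by_action(words):
--     actions = ["select", "remove", "delete"]
--
--     # We must split a sentence when we see a keyword
--     # For example, consider the following two sentences:
--     # (1) "Select all cubes left of the cylinder and the sphere." versus
--     # (2) "Select all cubes left of the cylinder and select the sphere."
--     # In (1), the "and" concatenates two constraints whereas in (2), the "and" concatenates two actions.
--
--     actions_and_words = []
--
--     # First, we find all action words.
--     action_indices = []
--     for i in range(len(words)):
--         token = words[i]
--         if token in actions: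
--             action_indices.append(i)
--
--     # Then, we find all words corresponding to that action
--     for k in range(len(action_indices)):
--         i = action_indices[k]
--         if k == len(action_indices) - 1:
--             actions_and_words.append((words[i], words[i + 1:]))
--         else:
--             j = action_indices[k + 1]
--             if words[j - 1] == "and":
--                 j -= 1
--             actions_and_words.append((words[i], words[i + 1:j]))
--     return actions_and_words
-- ===== SOURCE B (Python) =====
-- def _group_words_by_action(words):
--     actions = ["select", "remove", "delete"]
--     result = []
--     current = None  # (action, buffer) of the group being built, or None
--     for token in words:
--         if token in actions:
--             if current is not None:
--                 action, buf = current
--                 # a group closed by a following action drops one trailing "and"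
--                 if buf and buf[-1] == "and":
--                     buf = buf[:-1]
--                 result.append((action, buf))
--             current = (token, [])
--         elif current is not None:
--             current = (current[0], current[1] + [token])
--     if current is not None:
--         result.append(current)
--     return result
-- ===== Notes on version B (the rewrite author's own statement) =====
-- stated objective: alternative
-- what changed: A makes two passes (collect all action indices, then slice words[i+1:j] with a trailing-'and' check per adjacent index pair); B is a single forward state-machine pass that accumulates the current (action, buffer) group and finalizes it, trimming one trailing 'and', whenever the next action token appears.
import Mathlib
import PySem

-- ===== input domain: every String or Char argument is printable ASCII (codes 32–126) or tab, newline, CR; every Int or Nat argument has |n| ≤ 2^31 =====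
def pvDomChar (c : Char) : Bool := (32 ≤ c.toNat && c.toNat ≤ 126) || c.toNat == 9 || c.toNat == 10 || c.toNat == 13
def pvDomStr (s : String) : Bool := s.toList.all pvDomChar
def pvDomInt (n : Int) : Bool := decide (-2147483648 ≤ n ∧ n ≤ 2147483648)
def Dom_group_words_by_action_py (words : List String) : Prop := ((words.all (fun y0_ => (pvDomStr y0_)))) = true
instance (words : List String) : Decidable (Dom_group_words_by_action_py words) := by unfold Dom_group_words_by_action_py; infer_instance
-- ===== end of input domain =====

-- B replaces A's two passes (collect action indices, then slice between them) by a single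
-- forward state-machine pass over the words; alternative decomposition, same cost.


-- ===== PORT A =====
def pvActions_A : List String := ["select", "remove", "delete"]

-- 'for i in range(len(words)): if words[i] in actions: action_indices.append(i)'
-- i ranges over 0..len-1, so words[i] is exact as words.getD i "".
def pvCollect_A (words : List String) : List Nat :=
  (List.range words.length).foldl
    (fun acc i => if words.getD i "" ∈ pvActions_A then acc ++ [i] else acc) []

-- 'for k in range(len(action_indices))', accessing indices k and k+1: structural
-- recursion on the index list with the same three cases (empty / last k / inner k).
-- Python slices words[i+1:] and words[i+1:j] with 0 ≤ i+1, 0 ≤ j are exactly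
-- drop (i+1) and (drop (i+1)).take (j-(i+1)).
def pvLoop_A (words : List String) : List Nat → List (String × List String)
  | [] => []
  | [i] => [(words.getD i "", words.drop (i + 1))]
  | i :: j :: rest =>
      let j' := if words.getD (j - 1) "" = "and" then j - 1 else j
      (words.getD i "", (words.drop (i + 1)).take (j' - (i + 1))) :: pvLoop_A words (j :: rest)

def group_words_by_action_py (words : List String) : List (String × List String) :=
  pvLoop_A words (pvCollect_A words)

-- ===== PORT B =====
def pvActions_B : List String := ["select", "remove", "delete"]

-- 'if buf and buf[-1] == "and": buf = buf[:-1]'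
def pvTrim_B (buf : List String) : List String :=
  if buf.getLast? = some "and" then buf.dropLast else buf

-- loop body: state = (result, current)
def pvStep_B (st : List (String × List String) × Option (String × List String))
    (token : String) : List (String × List String) × Option (String × List String) :=
  if token ∈ pvActions_B then
    match st.2 with
    | none => (st.1, some (token, []))
    | some (a, buf) => (st.1 ++ [(a, pvTrim_B buf)], some (token, []))
  else
    match st.2 with
    | none => (st.1, none)
    | some (a, buf) => (st.1, some (a, buf ++ [token]))

def group_words_by_action_py_alt (words : List String) : List (String × List String) :=
  let st := words.foldl pvStep_B ([], none)
  match st.2 with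
  | none => st.1
  | some g => st.1 ++ [g]

-- ===== PRECONDITION & SPEC =====
def Spec_group_words_by_action_py (words : List String) (out : List (String × List String)) : Prop := out = group_words_by_action_py_alt words
instance (words : List String) (out : List (String × List String)) : Decidable (Spec_group_words_by_action_py words out) := by unfold Spec_group_words_by_action_py; infer_instance

-- ===== CLAIM (what is proved, stated in full; the proofs are below) =====
def Claim_equal_group_words_by_action_py : Prop := ∀ (words : List String), Dom_group_words_by_action_py words → Spec_group_words_by_action_py words (group_words_by_action_py words)

-- ===== LEMMAS AND PROOFS =====

-- proof-side reformulation of B's fold: 'pvGo' is the fold after the first action was seen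
def pvGo (a : String) (buf : List String) : List String → List (String × List String)
  | [] => [(a, buf)]
  | w :: ws =>
      if w ∈ pvActions_B then (a, pvTrim_B buf) :: pvGo w [] ws else pvGo a (buf ++ [w]) ws

def pvSpecFun : List String → List (String × List String)
  | [] => []
  | w :: ws => if w ∈ pvActions_B then pvGo w [] ws else pvSpecFun ws

def pvCont : Option (String × List String) → List String → List (String × List String)
  | none, ws => pvSpecFun ws
  | some (a, buf), ws => pvGo a buf ws

-- proof-side reformulation of A: index list and trimmed pairs
def pvIdx (ws : List String) : List Nat :=
  (List.range ws.length).filter (fun i => ws.getD i "" ∈ pvActions_A)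

def pvPairs (ws : List String) : List Nat → List (String × List String)
  | [] => []
  | [i] => [(ws.getD i "", ws.drop (i + 1))]
  | i :: j :: rest =>
      (ws.getD i "", pvTrim_B ((ws.drop (i + 1)).take (j - (i + 1)))) :: pvPairs ws (j :: rest)

def pvFin (st : List (String × List String) × Option (String × List String)) :
    List (String × List String) :=
  match st.2 with
  | none => st.1
  | some g => st.1 ++ [g]

theorem pvActions_eq : pvActions_A = pvActions_B := rfl

theorem pv_fold_B (ws : List String) :
    ∀ (res : List (String × List String)) (cur : Option (String × List String)),
      pvFin (ws.foldl pvStep_B (res, cur)) = res ++ pvCont cur ws := by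
  induction ws with
  | nil =>
    intro res cur
    match cur with
    | none => simp [pvFin, pvCont, pvSpecFun]
    | some (a, buf) => simp [pvFin, pvCont, pvGo]
  | cons w ws ih =>
    intro res cur
    rw [List.foldl_cons]
    by_cases h : w ∈ pvActions_B
    · match cur with
      | none =>
        rw [show pvStep_B (res, none) w = (res, some (w, [])) from by
          simp [pvStep_B, h]]
        rw [ih]
        simp [pvCont, pvSpecFun, h]
      | some (a, buf) =>
        rw [show pvStep_B (res, some (a, buf)) w =
            (res ++ [(a, pvTrim_B buf)], some (w, [])) from by simp [pvStep_B, h]]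
        rw [ih]
        simp [pvCont, pvGo, h]
    · match cur with
      | none =>
        rw [show pvStep_B (res, none) w = (res, none) from by simp [pvStep_B, h]]
        rw [ih]
        simp [pvCont, pvSpecFun, h]
      | some (a, buf) =>
        rw [show pvStep_B (res, some (a, buf)) w = (res, some (a, buf ++ [w])) from by
          simp [pvStep_B, h]]
        rw [ih]
        simp [pvCont, pvGo, h]

theorem pv_alt_eq_spec (ws : List String) : group_words_by_action_py_alt ws = pvSpecFun ws := by
  have h := pv_fold_B ws [] none
  simpa [group_words_by_action_py_alt, pvFin, pvCont] using h

-- A's index collection is a filter of range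
theorem pv_collect_eq_idx (ws : List String) : pvCollect_A ws = pvIdx ws := by
  simp [pvCollect_A, pvIdx, PySem.List.foldl_append_ite_eq_filter]

-- pvIdx on a cons
theorem pv_idx_cons (w : String) (ws : List String) :
    pvIdx (w :: ws) =
      (if w ∈ pvActions_A then [0] else []) ++ (pvIdx ws).map (· + 1) := by
  simp only [pvIdx, List.length_cons, List.range_succ_eq_map, List.filter_cons,
    List.filter_map, List.getD_cons_zero]
  by_cases h : w ∈ pvActions_A
  · simp only [h, if_true, decide_true, List.cons_append, List.nil_append,
      List.cons.injEq, true_and]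
    exact List.map_congr_left (fun a _ => rfl)
  · simp only [h, if_false, decide_false, List.nil_append]
    exact List.map_congr_left (fun a _ => rfl)

-- shifting all indices by one while consing a word changes nothing
theorem pv_pairs_shift (ws : List String) (w : String) :
    ∀ idxs : List Nat, pvPairs (w :: ws) (idxs.map (· + 1)) = pvPairs ws idxs := by
  intro idxs
  induction idxs with
  | nil => simp [pvPairs]
  | cons i rest ih =>
    match rest, ih with
    | [], _ => simp [pvPairs]
    | j :: rest, ih =>
      simp only [List.map_cons] at ih ⊢
      simp only [pvPairs, List.drop_succ_cons, List.getD_cons_succ]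
      rw [ih]
      have harith : j + 1 - (i + 1 + 1) = j - (i + 1) := by omega
      rw [harith]

-- the crux: pvGo against the index view
theorem pv_go_eq_pairs (ws : List String) :
    ∀ (a : String) (buf : List String),
      pvGo a buf ws =
        (a, match pvIdx ws with
            | [] => buf ++ ws
            | j :: _ => pvTrim_B (buf ++ ws.take j)) :: pvPairs ws (pvIdx ws) := by
  induction ws with
  | nil => intro a buf; simp [pvGo, pvIdx, pvPairs]
  | cons v vs ih =>
    intro a buf
    rw [pv_idx_cons v vs]
    by_cases h : v ∈ pvActions_A
    · have hB : v ∈ pvActions_B := pvActions_eq ▸ h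
      simp only [h, if_true]
      rw [show pvGo a buf (v :: vs) = (a, pvTrim_B buf) :: pvGo v [] vs from by
        simp [pvGo, hB]]
      rw [ih v []]
      match hi : pvIdx vs with
      | [] => simp [pvPairs, pvTrim_B, List.take_zero]
      | j :: rest =>
        have hs := pv_pairs_shift vs v (j :: rest)
        simp only [List.map_cons] at hs
        simp only [List.map_cons, List.cons_append, List.nil_append, pvPairs,
          List.getD_cons_zero, List.take_zero, List.append_nil, List.drop_succ_cons,
          List.drop_zero, Nat.add_sub_cancel, hs]
    · have hB : v ∉ pvActions_B := fun hx => h (pvActions_eq ▸ hx)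
      simp only [h, if_false, List.nil_append]
      rw [show pvGo a buf (v :: vs) = pvGo a (buf ++ [v]) vs from by simp [pvGo, hB]]
      rw [ih a (buf ++ [v])]
      rw [pv_pairs_shift vs v (pvIdx vs)]
      match hi : pvIdx vs with
      | [] => simp
      | j :: rest => simp [List.take_succ_cons]

theorem pv_spec_eq_pairs (ws : List String) : pvSpecFun ws = pvPairs ws (pvIdx ws) := by
  induction ws with
  | nil => simp [pvSpecFun, pvIdx, pvPairs]
  | cons v vs ih =>
    rw [pv_idx_cons]
    by_cases h : v ∈ pvActions_A
    · have hB : v ∈ pvActions_B := pvActions_eq ▸ h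
      rw [show pvSpecFun (v :: vs) = pvGo v [] vs from by simp [pvSpecFun, hB]]
      rw [pv_go_eq_pairs vs v []]
      simp only [h, if_true]
      match hi : pvIdx vs with
      | [] => simp [pvPairs]
      | j :: rest =>
        have hs := pv_pairs_shift vs v (j :: rest)
        simp only [List.map_cons] at hs
        simp only [List.map_cons, List.cons_append, List.nil_append, pvPairs,
          List.getD_cons_zero, List.drop_succ_cons,
          List.drop_zero, Nat.add_sub_cancel, hs]
    · have hB : v ∉ pvActions_B := fun hx => h (pvActions_eq ▸ hx)
      rw [show pvSpecFun (v :: vs) = pvSpecFun vs from by simp [pvSpecFun, hB]]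
      simp only [h, if_false, List.nil_append]
      rw [ih, pv_pairs_shift vs v (pvIdx vs)]

-- A's 'words[j-1] == "and"' shortening is exactly pvTrim_B of the slice, given i < j < len
-- and words[i] not "and"
theorem pv_trim_slice (ws : List String) (i j : Nat) (hij : i < j) (hj : j < ws.length) :
    (ws.drop (i + 1)).take ((if ws.getD (j - 1) "" = "and" then j - 1 else j) - (i + 1)) =
      pvTrim_B ((ws.drop (i + 1)).take (j - (i + 1))) := by
  by_cases hadj : j = i + 1
  · subst hadj
    rw [show ((if ws.getD (i + 1 - 1) "" = "and" then i + 1 - 1 else i + 1) - (i + 1)) = 0 from by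
      split <;> omega]
    rw [show i + 1 - (i + 1) = 0 from by omega]
    simp [pvTrim_B]
  · have h2 : i + 1 < j := by omega
    have hlen : ((ws.drop (i + 1)).take (j - (i + 1))).length = j - (i + 1) := by
      simp [List.length_take, List.length_drop]
      omega
    have hjl : j - 1 < ws.length := by omega
    have hlast : ((ws.drop (i + 1)).take (j - (i + 1))).getLast? = some (ws.getD (j - 1) "") := by
      rw [List.getLast?_eq_getElem?, hlen, List.getElem?_take_of_lt (by omega),
        List.getElem?_drop]
      rw [show i + 1 + (j - (i + 1) - 1) = j - 1 from by omega]
      rw [List.getElem?_eq_getElem hjl]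
      simp [List.getD_eq_getElem?_getD, List.getElem?_eq_getElem hjl]
    by_cases hand : ws.getD (j - 1) "" = "and"
    · simp only [hand, if_true, pvTrim_B, hlast]
      rw [List.dropLast_eq_take, hlen, List.take_take]
      congr 1
      omega
    · simp only [hand, if_false, pvTrim_B, hlast]
      rw [if_neg (by simpa using hand)]

theorem pv_loop_eq_pairs (ws : List String) :
    ∀ idxs : List Nat, List.Pairwise (· < ·) idxs →
      (∀ k ∈ idxs, k < ws.length ∧ ws.getD k "" ∈ pvActions_A) →
      pvLoop_A ws idxs = pvPairs ws idxs := by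
  intro idxs
  induction idxs with
  | nil => intro _ _; rfl
  | cons i rest ih =>
    intro hp hm
    cases rest with
    | nil => rfl
    | cons j rest' =>
      have hij : i < j := (List.pairwise_cons.1 hp).1 j (by simp)
      have hj := hm j (by simp)
      simp only [pvLoop_A]
      rw [pv_trim_slice ws i j hij hj.1]
      simp only [pvPairs]
      rw [ih (List.pairwise_cons.1 hp).2 (fun k hk => hm k (List.mem_cons_of_mem _ hk))]

theorem pv_idx_sorted (ws : List String) : List.Pairwise (· < ·) (pvIdx ws) :=
  List.Pairwise.filter _ (List.pairwise_lt_range)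

theorem pv_idx_mem (ws : List String) (k : Nat) (hk : k ∈ pvIdx ws) :
    k < ws.length ∧ ws.getD k "" ∈ pvActions_A := by
  rw [pvIdx, List.mem_filter, List.mem_range] at hk
  exact ⟨hk.1, by simpa using hk.2⟩

theorem pv_A_eq_alt (ws : List String) :
    group_words_by_action_py ws = group_words_by_action_py_alt ws := by
  rw [group_words_by_action_py, pv_collect_eq_idx,
    pv_loop_eq_pairs ws (pvIdx ws) (pv_idx_sorted ws) (pv_idx_mem ws),
    ← pv_spec_eq_pairs, pv_alt_eq_spec]

-- ===== VERDICT (by name: the statement is the Claim_ definition above) =====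
theorem group_words_by_action_py_spec : Claim_equal_group_words_by_action_py := by
  intro words _
  exact pv_A_eq_alt words
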